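-- pv_equiv track=rewrite | github.com/ktrocks3/LeetCode | Quest/DS&A/Prefix Sum/Q3. Ways to Make a Fair Array.py | waysToMakeFair
-- ===== SOURCE A (Python) =====
-- from typing import List
--
-- def waysToMakeFair(nums: List[int]) -> int:
--     oddSum = []
--     evenSum = []
--     n = len(nums)
--     for i, num in enumerate(nums):
--         if i % 2 == 0:
--             if i == 0:
--                 evenSum.append(num)
--                 oddSum.append(0)
--             else:
--                 evenSum.append(num + evenSum[-1])
--                 oddSum.append(oddSum[-1])
--         else:
--             oddSum.append(num + oddSum[-1])
--             evenSum.append(evenSum[-1])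
--     total = 0
--     for i in range(n):
--         leftOdd = oddSum[i - 1] if i > 0 else 0
--         leftEven = evenSum[i - 1] if i > 0 else 0
--
--         tempOddSum = leftOdd + (evenSum[n - 1] - evenSum[i])
--         tempEvenSum = leftEven + (oddSum[n - 1] - oddSum[i])
--
--         if tempOddSum == tempEvenSum:
--             total += 1
--     return total
-- ===== SOURCE B (Python) =====
-- from typing import List
--
-- def waysToMakeFair(nums: List[int]) -> int:
--     # Alternating-sign reduction: removing index i is fair
--     # iff 2 * (signed prefix before i) == signedTotal - signed[i],
--     # where signed[j] = +nums[j] at even j, -nums[j] at odd j.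
--     signed = [v if i % 2 == 0 else -v for i, v in enumerate(nums)]
--     T = sum(signed)
--     count = 0
--     P = 0
--     for a in signed:
--         if 2 * P == T - a:
--             count += 1
--         P += a
--     return count
-- ===== Notes on version B (the rewrite author's own statement) =====
-- stated objective: simpler
-- what changed: B reduces the problem algebraically: it maps nums to an alternating-sign sequence and counts positions where 2*(signed prefix sum) equals signedTotal minus the signed element, replacing A's two prefix-sum arrays and per-index parity case analysis with one signed accumulator and a single parity-free counting loop.
import Mathlib
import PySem

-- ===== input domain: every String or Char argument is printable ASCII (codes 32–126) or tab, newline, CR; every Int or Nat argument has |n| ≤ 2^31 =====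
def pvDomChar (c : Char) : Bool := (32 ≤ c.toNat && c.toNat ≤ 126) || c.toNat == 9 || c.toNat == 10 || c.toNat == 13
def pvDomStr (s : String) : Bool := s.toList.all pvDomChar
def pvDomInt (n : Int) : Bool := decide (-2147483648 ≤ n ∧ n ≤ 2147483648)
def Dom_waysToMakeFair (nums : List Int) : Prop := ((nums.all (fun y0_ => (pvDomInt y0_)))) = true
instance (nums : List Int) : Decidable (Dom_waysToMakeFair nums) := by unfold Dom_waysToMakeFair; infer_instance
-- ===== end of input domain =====

/- B maps nums to an alternating-sign sequence and counts positions where 2*(signed prefix) = signedTotal - signed element, replacing A's two prefix-sum arrays and parity case analysis with one accumulator (objective: simpler). -/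


-- ===== PORT A =====
-- literal transliteration of A: build oddSum/evenSum prefix arrays by appending
-- (Python's arr[-1] is ported as pyGetD arr (-1) 0; the list is provably nonempty there,
-- and every index in the second loop is provably in range, so the default is never used)
def waysToMakeFair (nums : List Int) : Int :=
  let n : Int := nums.length
  let arrs := (PySem.List.enumerate nums 0).foldl
    (fun (st : List Int × List Int) (p : Int × Int) =>
      let oddSum := st.1
      let evenSum := st.2
      let i := p.1
      let num := p.2
      if PySem.Int.mod i 2 == 0 then
        if i == 0 then
          (oddSum ++ [0], evenSum ++ [num])
        else
          (oddSum ++ [PySem.List.pyGetD oddSum (-1) 0],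
           evenSum ++ [num + PySem.List.pyGetD evenSum (-1) 0])
      else
        (oddSum ++ [num + PySem.List.pyGetD oddSum (-1) 0],
         evenSum ++ [PySem.List.pyGetD evenSum (-1) 0]))
    ([], [])
  let oddSum := arrs.1
  let evenSum := arrs.2
  (PySem.List.pyRange 0 n 1).foldl
    (fun total i =>
      let leftOdd := if i > 0 then PySem.List.pyGetD oddSum (i - 1) 0 else 0
      let leftEven := if i > 0 then PySem.List.pyGetD evenSum (i - 1) 0 else 0
      let tempOddSum := leftOdd + (PySem.List.pyGetD evenSum (n - 1) 0 - PySem.List.pyGetD evenSum i 0)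
      let tempEvenSum := leftEven + (PySem.List.pyGetD oddSum (n - 1) 0 - PySem.List.pyGetD oddSum i 0)
      if tempOddSum == tempEvenSum then total + 1 else total)
    0

-- ===== PORT B =====
-- literal transliteration of B: alternating-sign transform (a map over enumerate),
-- its sum, then a single parity-free counting pass with one running prefix P
def waysToMakeFair_alt (nums : List Int) : Int :=
  let signed := (PySem.List.enumerate nums 0).map
    (fun p => if PySem.Int.mod p.1 2 == 0 then p.2 else -p.2)
  let T := signed.foldl (· + ·) 0
  let fin := signed.foldl
    (fun (st : Int × Int) a =>
      let count := if 2 * st.1 == T - a then st.2 + 1 else st.2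
      (st.1 + a, count))
    (0, 0)
  fin.2

-- ===== PRECONDITION & SPEC =====
def Spec_waysToMakeFair (nums : List Int) (out : Int) : Prop := out = waysToMakeFair_alt nums
instance (nums : List Int) (out : Int) : Decidable (Spec_waysToMakeFair nums out) := by unfold Spec_waysToMakeFair; infer_instance

-- ===== CLAIM (what is proved, stated in full; the proofs are below) =====
def Claim_equal_waysToMakeFair : Prop := ∀ (nums : List Int), Dom_waysToMakeFair nums → Spec_waysToMakeFair nums (waysToMakeFair nums)

-- ===== LEMMAS AND PROOFS =====

def pvSums (ev : Bool) : List Int → Int × Int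
  | [] => (0, 0)
  | x :: xs =>
    let s := pvSums (!ev) xs
    if ev then (s.1 + x, s.2) else (s.1, s.2 + x)

def pvCond (tE tO lE lO : Int) (ev : Bool) (xs : List Int) (j : Nat) : Bool :=
  let p := pvSums ev (xs.take j)
  let q := pvSums ev (xs.take (j + 1))
  (lE + p.1) + (tO - (lO + q.2)) == (lO + p.2) + (tE - (lE + q.1))

theorem pvFlip (s : Int) : (PySem.Int.mod (s + 1) 2 == 0) = !(PySem.Int.mod s 2 == 0) := by
  have h1 : PySem.Int.mod (s+1) 2 = (s+1) % 2 := PySem.Int.mod_eq_emod_of_pos (by omega)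
  have h2 : PySem.Int.mod s 2 = s % 2 := PySem.Int.mod_eq_emod_of_pos (by omega)
  rcases Int.emod_two_eq s with h | h <;>
    · rw [h1, h2, h]; simp [beq_iff_eq]; omega

theorem pvBeq_congr {a b c d : Int} (h : a = b ↔ c = d) : (a == b) = (c == d) := by
  cases hcd : (c == d) <;> cases hab : (a == b) <;> simp_all [beq_iff_eq]

-- the signed (alternating-sign) sequence B computes, as structural recursion
def pvSigned (ev : Bool) : List Int → List Int
  | [] => []
  | x :: xs => (if ev then x else -x) :: pvSigned (!ev) xs

theorem pvSigned_enum (xs : List Int) : ∀ (s : Int),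
    (PySem.List.enumerate xs s).map
      (fun p => if PySem.Int.mod p.1 2 == 0 then p.2 else -p.2)
    = pvSigned (PySem.Int.mod s 2 == 0) xs := by
  induction xs with
  | nil => intro s; simp [PySem.List.enumerate_nil, pvSigned]
  | cons x xs ih =>
    intro s
    rw [PySem.List.enumerate_cons, List.map_cons, ih (s + 1), pvFlip]
    cases hev : (PySem.Int.mod s 2 == 0) <;> simp [pvSigned, hev]

theorem pvSigned_sum (xs : List Int) : ∀ (ev : Bool) (acc : Int),
    (pvSigned ev xs).foldl (· + ·) acc
      = acc + ((pvSums ev xs).1 - (pvSums ev xs).2) := by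
  induction xs with
  | nil => intro ev acc; simp [pvSigned, pvSums]
  | cons x xs ih =>
    intro ev acc
    cases ev <;>
      · simp only [pvSigned, List.foldl_cons, pvSums, if_true, if_false,
          Bool.false_eq_true, Bool.not_true, Bool.not_false]
        rw [ih]
        ring

-- B's fairness test at index j, in signed form
-- B's fairness test at index j, written over signed prefix differences
def pvCondS (T P : Int) (ev : Bool) (xs : List Int) (j : Nat) : Bool :=
  let p := pvSums ev (xs.take j)
  let q := pvSums ev (xs.take (j + 1))
  (P + (p.1 - p.2)) + (P + (q.1 - q.2)) == T

theorem pvCondS_shift (T P : Int) (ev : Bool) (x : Int) (xs : List Int) (j : Nat) :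
    pvCondS T P ev (x :: xs) (j + 1)
      = pvCondS T (P + (if ev then x else -x)) (!ev) xs j := by
  cases ev <;>
    simp only [pvCondS, List.take_succ_cons, pvSums, Bool.not_true, Bool.not_false,
      if_true, if_false, Bool.false_eq_true, Bool.true_eq_false] <;>
    (congr 1 <;> ring)

theorem pvB_loop (T : Int) (xs : List Int) : ∀ (ev : Bool) (P c : Int),
    ((pvSigned ev xs).foldl
      (fun (st : Int × Int) a =>
        let count := if 2 * st.1 == T - a then st.2 + 1 else st.2
        (st.1 + a, count)) (P, c)).2
    = c + ((List.range xs.length).countP (pvCondS T P ev xs) : Int) := by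
  induction xs with
  | nil => intro ev P c; simp [pvSigned]
  | cons x xs ih =>
    intro ev P c
    have hrange : List.range (x :: xs).length = 0 :: (List.range xs.length).map Nat.succ := by
      simp [List.range_succ_eq_map]
    rw [hrange, List.countP_cons, List.countP_map]
    have hcomp : ((pvCondS T P ev (x :: xs)) ∘ Nat.succ)
        = pvCondS T (P + (if ev then x else -x)) (!ev) xs := by
      funext j
      exact pvCondS_shift T P ev x xs j
    have h0 : pvCondS T P ev (x :: xs) 0 = (2 * P == T - (if ev then x else -x)) := by
      cases ev <;>
        · simp only [pvCondS, List.take_zero, List.take_succ_cons, pvSums,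
            if_true, if_false, Bool.false_eq_true]
          exact pvBeq_congr (by constructor <;> intro <;> omega)
    rw [hcomp, h0]
    simp only [pvSigned, List.foldl_cons]
    cases ev <;>
      · simp only [if_true, if_false, Bool.false_eq_true, Bool.not_true, Bool.not_false]
        rw [ih]
        cases hbv : (2 * P == T - x) <;> cases hbv' : (2 * P == T - (-x)) <;>
          simp_all <;> push_cast <;> ring

theorem pvB_eq (nums : List Int) :
    waysToMakeFair_alt nums
      = ((List.range nums.length).countP
          (pvCond (pvSums true nums).1 (pvSums true nums).2 0 0 true nums) : Int) := by
  have h0 : (PySem.Int.mod 0 2 == 0) = true := by decide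
  have hs := pvSigned_enum nums 0
  rw [h0] at hs
  simp only [waysToMakeFair_alt, hs, pvSigned_sum nums true 0, zero_add]
  rw [pvB_loop, zero_add]
  refine congrArg _ (List.countP_congr ?_)
  intro j hj
  simp only [pvCond, pvCondS, zero_add, beq_iff_eq]
  constructor <;> intro <;> omega

def pvScan (ev : Bool) (oL eL : Int) : List Int → List Int × List Int
  | [] => ([], [])
  | x :: xs =>
    if ev then
      let r := pvScan false oL (x + eL) xs
      (oL :: r.1, (x + eL) :: r.2)
    else
      let r := pvScan true (x + oL) eL xs
      ((x + oL) :: r.1, eL :: r.2)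

theorem pvScan_get (xs : List Int) : ∀ (j : Nat), j < xs.length → ∀ (ev : Bool) (oL eL : Int),
    (pvScan ev oL eL xs).1[j]? = some (oL + (pvSums ev (xs.take (j + 1))).2)
    ∧ (pvScan ev oL eL xs).2[j]? = some (eL + (pvSums ev (xs.take (j + 1))).1) := by
  induction xs with
  | nil => intro j hj; simp at hj
  | cons x xs ih =>
    intro j hj ev oL eL
    cases j with
    | zero =>
      cases ev <;> simp [pvScan, pvSums, Int.add_comm]
    | succ j =>
      have hj' : j < xs.length := by simpa using hj
      cases ev
      case false =>
        simp only [pvScan, List.getElem?_cons_succ, List.take_succ_cons, pvSums,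
          if_false, Bool.false_eq_true, Bool.not_false, if_true]
        refine ⟨?_, ?_⟩
        · rw [(ih j hj' true (x + oL) eL).1]; congr 1; ring
        · rw [(ih j hj' true (x + oL) eL).2]
      case true =>
        simp only [pvScan, List.getElem?_cons_succ, List.take_succ_cons, pvSums,
          if_false, Bool.false_eq_true, Bool.not_true, if_true]
        refine ⟨?_, ?_⟩
        · rw [(ih j hj' false oL (x + eL)).1]
        · rw [(ih j hj' false oL (x + eL)).2]; congr 1; ring

theorem pvA_build (xs : List Int) : ∀ (s : Int), 1 ≤ s → ∀ (oAcc eAcc : List Int) (oL eL : Int),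
    oAcc.getLast? = some oL → eAcc.getLast? = some eL →
    (PySem.List.enumerate xs s).foldl
      (fun (st : List Int × List Int) (p : Int × Int) =>
        if PySem.Int.mod p.1 2 == 0 then
          if p.1 == 0 then
            (st.1 ++ [0], st.2 ++ [p.2])
          else
            (st.1 ++ [PySem.List.pyGetD st.1 (-1) 0],
             st.2 ++ [p.2 + PySem.List.pyGetD st.2 (-1) 0])
        else
          (st.1 ++ [p.2 + PySem.List.pyGetD st.1 (-1) 0],
           st.2 ++ [PySem.List.pyGetD st.2 (-1) 0])) (oAcc, eAcc)
    = (oAcc ++ (pvScan (PySem.Int.mod s 2 == 0) oL eL xs).1,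
       eAcc ++ (pvScan (PySem.Int.mod s 2 == 0) oL eL xs).2) := by
  induction xs with
  | nil => intro s hs oAcc eAcc oL eL ho he; simp [PySem.List.enumerate_nil, pvScan]
  | cons x xs ih =>
    intro s hs oAcc eAcc oL eL ho he
    rw [PySem.List.enumerate_cons, List.foldl_cons]
    have hne0 : ((s : Int) == 0) = false := by simp [beq_iff_eq]; omega
    have hoNe : oAcc ≠ [] := by intro h; rw [h] at ho; simp at ho
    have heNe : eAcc ≠ [] := by intro h; rw [h] at he; simp at he
    have hoL : PySem.List.pyGetD oAcc (-1) 0 = oL := by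
      rw [PySem.List.pyGetD_neg_one oAcc 0 hoNe]
      exact List.getLast_of_mem_getLast? ho
    have heL : PySem.List.pyGetD eAcc (-1) 0 = eL := by
      rw [PySem.List.pyGetD_neg_one eAcc 0 heNe]
      exact List.getLast_of_mem_getLast? he
    cases hev : (PySem.Int.mod s 2 == 0)
    case false =>
      simp only [hev, hne0, if_false, Bool.false_eq_true, hoL, heL]
      rw [ih (s + 1) (by omega) _ _ (x + oL) eL (by simp) (by simpa using he)]
      rw [pvFlip, hev]
      simp only [Bool.not_false, pvScan, if_false, Bool.false_eq_true]
      simp [List.append_assoc]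
    case true =>
      simp only [hev, hne0, if_true, if_false, Bool.false_eq_true, hoL, heL]
      rw [ih (s + 1) (by omega) _ _ oL (x + eL) (by simpa using ho) (by simp)]
      rw [pvFlip, hev]
      simp only [Bool.not_true, pvScan, if_true]
      simp [List.append_assoc]

theorem pvArr_get (x : Int) (xs : List Int) (j : Nat) (hj : j < (x :: xs).length) :
    (0 :: (pvScan false 0 x xs).1)[j]? = some ((pvSums true ((x :: xs).take (j + 1))).2)
    ∧ (x :: (pvScan false 0 x xs).2)[j]? = some ((pvSums true ((x :: xs).take (j + 1))).1) := by
  cases j with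
  | zero => simp [pvSums]
  | succ j =>
    have hj' : j < xs.length := by simpa using hj
    simp only [List.getElem?_cons_succ, List.take_succ_cons, pvSums, Bool.not_true, if_true]
    exact ⟨by rw [(pvScan_get xs j hj' false 0 x).1]; simp,
           by rw [(pvScan_get xs j hj' false 0 x).2]; simp [Int.add_comm]⟩

theorem pvA_eq (nums : List Int) :
    waysToMakeFair nums
      = ((List.range nums.length).countP
          (pvCond (pvSums true nums).1 (pvSums true nums).2 0 0 true nums) : Int) := by
  cases nums with
  | nil => rfl
  | cons x xs =>
    simp only [waysToMakeFair]
    rw [PySem.List.enumerate_cons, List.foldl_cons]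
    have h00 : (PySem.Int.mod 0 2 == 0) = true := by decide
    simp only [h00, if_true, beq_self_eq_true, List.nil_append, zero_add]
    rw [pvA_build xs 1 (by omega) [0] [x] 0 x (by simp) (by simp)]
    have h1 : (PySem.Int.mod 1 2 == 0) = false := by decide
    rw [h1]
    simp only [List.singleton_append]
    rw [PySem.List.pyRange_one 0 ((x :: xs).length : Int)]
    simp only [Int.sub_zero, Int.toNat_natCast, List.foldl_map, zero_add]
    rw [PySem.List.foldl_if_add_one]
    rw [zero_add]
    refine congrArg _ (List.countP_congr ?_)
    intro j hj
    have hjlt : j < xs.length + 1 := by simpa using hj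
    have hOdd : ∀ k, k < xs.length + 1 →
        PySem.List.pyGetD (0 :: (pvScan false 0 x xs).1) ((k : Nat) : Int) 0
          = (pvSums true ((x :: xs).take (k + 1))).2 := by
      intro k hk
      rw [PySem.List.pyGetD_natCast, List.getD_eq_getElem?_getD,
        (pvArr_get x xs k (by simpa using hk)).1, Option.getD_some]
    have hEven : ∀ k, k < xs.length + 1 →
        PySem.List.pyGetD (x :: (pvScan false 0 x xs).2) ((k : Nat) : Int) 0
          = (pvSums true ((x :: xs).take (k + 1))).1 := by
      intro k hk
      rw [PySem.List.pyGetD_natCast, List.getD_eq_getElem?_getD,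
        (pvArr_get x xs k (by simpa using hk)).2, Option.getD_some]
    have hlm : ((x :: xs).length : Int) - 1 = ((xs.length : Nat) : Int) := by
      simp
    have htake : (x :: xs).take (xs.length + 1) = x :: xs := by
      have : xs.length + 1 = (x :: xs).length := by simp
      rw [this, List.take_length]
    rw [hlm, hOdd xs.length (by omega), hEven xs.length (by omega), htake]
    cases j with
    | zero =>
      rw [if_neg (by omega), if_neg (by omega)]
      rw [show ((0 : Nat) : Int) = ((0:Nat) : Int) from rfl, hOdd 0 (by omega), hEven 0 (by omega)]
      have : (pvCond (pvSums true (x :: xs)).1 (pvSums true (x :: xs)).2 0 0 true (x :: xs) 0)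
          = ((0 : Int) + ((pvSums true (x :: xs)).1 - (pvSums true ((x :: xs).take 1)).1) ==
             0 + ((pvSums true (x :: xs)).2 - (pvSums true ((x :: xs).take 1)).2)) := by
        simp only [pvCond, List.take_zero, pvSums]
        rw [Bool.beq_comm]
        congr 1 <;> ring
      rw [this]
    | succ i =>
      rw [if_pos (show ((i+1 : Nat) : Int) > 0 from by exact_mod_cast Nat.succ_pos i),
        if_pos (show ((i+1 : Nat) : Int) > 0 from by exact_mod_cast Nat.succ_pos i)]
      rw [show ((i + 1 : Nat) : Int) - 1 = ((i : Nat) : Int) from by push_cast; ring]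
      rw [hOdd i (by omega), hEven i (by omega), hOdd (i+1) (by omega), hEven (i+1) (by omega)]
      have : (pvCond (pvSums true (x :: xs)).1 (pvSums true (x :: xs)).2 0 0 true (x :: xs) (i+1))
          = ((pvSums true ((x :: xs).take (i + 1))).2 +
              ((pvSums true (x :: xs)).1 - (pvSums true ((x :: xs).take (i + 1 + 1))).1) ==
             (pvSums true ((x :: xs).take (i + 1))).1 +
              ((pvSums true (x :: xs)).2 - (pvSums true ((x :: xs).take (i + 1 + 1))).2)) := by
        simp only [pvCond]
        rw [Bool.beq_comm]
        congr 1 <;> ring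
      rw [this]

-- ===== VERDICT (by name: the statement is the Claim_ definition above) =====
theorem waysToMakeFair_spec : Claim_equal_waysToMakeFair := by
  intro nums _
  unfold Spec_waysToMakeFair
  rw [pvA_eq, pvB_eq]
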